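-- pv_equiv track=rewrite | github.com/didiercrunch/simulationexam | network/network.py | pp_network
-- ===== SOURCE A (Python) =====
-- def _get_print_symbol(network, position):
--     black_square = '\u25A0'
--     white_square = '\u25A1'
--     activated_antennas = set(get_activated_antennas(network))
--     if position in activated_antennas:
--         return black_square
--     return white_square
--
-- def pp_network(network, box_size):
--     ret = ""
--     for line in range(box_size):
--         for column in range(box_size):
--             symbol =  _get_print_symbol(network, line * box_size + column)
--             ret += symbol + '-'
--         ret = ret[:-1] + '\n'
--     return ret
--
-- def get_activated_antennas(network):
--     i = 0
--     while network > 0: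
--         if network % 2:
--             yield i
--         network = network >> 1
--         i += 1
-- ===== SOURCE B (Python) =====
-- WHITE = '\u25A1'
-- BLACK = '\u25A0'
--
-- def pp_network(network, box_size):
--     if box_size <= 0:
--         return ""
--     n = box_size * box_size
--     bits = bin(network)[2:][::-1] if network > 0 else ""
--     flat = bits.ljust(n, '0')[:n].translate({ord('0'): WHITE, ord('1'): BLACK})
--     return "".join("-".join(flat[r * box_size:(r + 1) * box_size]) + "\n"
--                    for r in range(box_size))
-- ===== Notes on version B (the rewrite author's own statement) =====
-- stated objective: faster
-- what changed: A recomputes the activated-antenna set from scratch for every cell and tests membership per cell; B computes the reversed binary digit string once, pads/truncates and translates it into a flat symbol table, then slices it into rows joined with '-'.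
import Mathlib
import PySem

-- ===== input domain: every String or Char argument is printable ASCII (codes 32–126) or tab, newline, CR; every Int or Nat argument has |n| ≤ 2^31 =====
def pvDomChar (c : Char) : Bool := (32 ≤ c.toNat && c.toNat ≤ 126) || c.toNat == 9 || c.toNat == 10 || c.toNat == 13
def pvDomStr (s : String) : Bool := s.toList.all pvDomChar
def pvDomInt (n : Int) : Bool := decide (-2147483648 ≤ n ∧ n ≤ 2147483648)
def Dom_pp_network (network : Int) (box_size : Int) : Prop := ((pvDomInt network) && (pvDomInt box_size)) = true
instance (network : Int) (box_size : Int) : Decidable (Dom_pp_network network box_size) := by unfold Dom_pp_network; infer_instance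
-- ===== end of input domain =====

-- B replaces A's per-cell regeneration of the activated-antenna set by computing the
-- reversed bit string once, padding/translating it to a flat symbol table and slicing
-- it into rows (objective: faster).

-- ===== PORT A =====
-- 'while network > 0: if network % 2: yield i; network >>= 1; i += 1' materialised as a list
def get_activated_antennas (network : Int) (i : Int) : List Int :=
  if h : network > 0 then
    (if network % 2 ≠ 0 then [i] else []) ++ get_activated_antennas (network / 2) (i + 1)
  else []
termination_by network.toNat
decreasing_by
  have h2 : network / 2 < network := by omega
  omega

def pv_get_print_symbol (network : Int) (position : Int) : Char :=
  let activated := PySem.Set.ofList (get_activated_antennas network 0)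
  if position ∈ activated then '■' else '□'

def pp_network (network : Int) (box_size : Int) : String :=
  let ret : List Char :=
    (PySem.List.pyRange 0 box_size 1).foldl (fun ret line =>
      let ret := (PySem.List.pyRange 0 box_size 1).foldl (fun ret column =>
        ret ++ [pv_get_print_symbol network (line * box_size + column), '-']) ret
      PySem.List.slice ret none (some (-1)) ++ ['\n']) []
  String.ofList ret

-- ===== PORT B =====
-- bin(network)[2:][::-1] : reversed binary digits, least-significant first
def pv_bits_rev (n : Int) : List Char :=
  if h : n > 0 then
    (if n % 2 = 1 then '1' else '0') :: pv_bits_rev (n / 2)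
  else []
termination_by n.toNat
decreasing_by
  have h2 : n / 2 < n := by omega
  omega

def pv_translate (c : Char) : Char := if c = '1' then '■' else '□'

def pp_network_alt (network : Int) (box_size : Int) : String :=
  if box_size ≤ 0 then "" else
    let n : Nat := (box_size * box_size).toNat
    let bits : List Char := pv_bits_rev network
    let flat : List Char :=
      ((bits ++ List.replicate (n - bits.length) '0').take n).map pv_translate
    String.ofList
      (((PySem.List.pyRange 0 box_size 1).map (fun r =>
          (PySem.List.slice flat (some (r * box_size)) (some ((r + 1) * box_size))).intersperse '-'
            ++ ['\n'])).flatten)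

-- ===== PRECONDITION & SPEC =====
def Spec_pp_network (network : Int) (box_size : Int) (out : String) : Prop := out = pp_network_alt network box_size
instance (network : Int) (box_size : Int) (out : String) : Decidable (Spec_pp_network network box_size out) := by unfold Spec_pp_network; infer_instance

-- ===== CLAIM (what is proved, stated in full; the proofs are below) =====
def Claim_equal_pp_network : Prop := ∀ (network : Int) (box_size : Int), Dom_pp_network network box_size → Spec_pp_network network box_size (pp_network network box_size)

-- ===== LEMMAS AND PROOFS =====

lemma bits_chars : ∀ (net : Int), ∀ c ∈ pv_bits_rev net, c = '1' ∨ c = '0' := by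
  intro net
  fun_induction pv_bits_rev net with
  | case1 n h ih =>
    intro c hc
    rcases List.mem_cons.mp hc with h0 | h1
    · subst h0; split <;> simp
    · exact ih c h1
  | case2 n h => simp

lemma gaa_lb : ∀ (net i p : Int), p ∈ get_activated_antennas net i → i ≤ p := by
  intro net i
  fun_induction get_activated_antennas net i with
  | case1 n i h ih =>
    intro p hp
    rcases List.mem_append.mp hp with h0 | h1
    · split at h0 <;> simp at h0; omega
    · have := ih p h1; omega
  | case2 n i h => intro p hp; simp at hp

lemma gaa_iff_bit : ∀ (net i : Int) (k : Nat),
    (i + (k : Int) ∈ get_activated_antennas net i) ↔ (pv_bits_rev net)[k]? = some '1' := by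
  intro net i
  fun_induction get_activated_antennas net i with
  | case1 n i h ih =>
    intro k
    rw [pv_bits_rev, dif_pos h]
    cases k with
    | zero =>
      simp only [List.getElem?_cons_zero, Nat.cast_zero, add_zero, List.mem_append]
      constructor
      · rintro (h0 | h1)
        · split at h0 <;> simp at h0
          have : n % 2 = 1 := by omega
          simp [this]
        · exact absurd (gaa_lb _ _ _ h1) (by omega)
      · intro hc
        left
        have h1 : n % 2 = 1 := by
          by_contra hne
          have : n % 2 = 0 := by omega
          simp [this] at hc
        simp [h1]
    | succ k' =>
      simp only [List.getElem?_cons_succ, List.mem_append]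
      have hcast : i + ((k' + 1 : Nat) : Int) = (i + 1) + (k' : Int) := by push_cast; ring
      rw [hcast, ← ih k']
      constructor
      · rintro (h0 | h1)
        · split at h0 <;> simp at h0; omega
        · exact h1
      · intro h1; right; exact h1
  | case2 n i h =>
    intro k
    rw [pv_bits_rev, dif_neg h]
    simp

def pvFlat (net : Int) (n : Nat) : List Char :=
  ((pv_bits_rev net ++ List.replicate (n - (pv_bits_rev net).length) '0').take n).map pv_translate

lemma sym_eq_bit (net : Int) (k : Nat) :
    pv_get_print_symbol net (k : Int) = (if (pv_bits_rev net)[k]? = some '1' then '■' else '□') := by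
  have h := gaa_iff_bit net 0 k
  rw [zero_add] at h
  simp only [pv_get_print_symbol, PySem.Set.mem_ofList, h]

lemma length_flat (net : Int) (n : Nat) : (pvFlat net n).length = n := by
  simp [pvFlat]; omega

lemma flat_getElem (net : Int) (n : Nat) (k : Nat) (_hk : k < n)
    (h : k < (pvFlat net n).length) :
    (pvFlat net n)[k] = pv_get_print_symbol net (k : Int) := by
  rw [sym_eq_bit]
  simp only [pvFlat, List.getElem_map, List.getElem_take]
  by_cases hb : k < (pv_bits_rev net).length
  · rw [List.getElem_append_left hb]
    rw [List.getElem?_eq_getElem hb]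
    rcases bits_chars net _ (List.getElem_mem hb) with h1 | h0
    · simp [h1, pv_translate]
    · simp [h0, pv_translate]
  · rw [List.getElem_append_right (by omega)]
    rw [List.getElem?_eq_none (by omega)]
    simp [pv_translate]

lemma flatten_dash_dropLast : ∀ (l : List Char), l ≠ [] →
    ((l.map (fun s => [s, '-'])).flatten).dropLast = l.intersperse '-' := by
  intro l
  induction l with
  | nil => simp
  | cons a t ih =>
    intro _
    cases t with
    | nil => simp [List.intersperse]
    | cons b t' =>
      have hne : (([b, '-'] :: List.map (fun s => [s, '-']) t').flatten) ≠ [] := by simp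
      simp only [List.map_cons]
      rw [List.flatten_cons, List.dropLast_append_of_ne_nil hne,
        show (([b, '-'] :: List.map (fun s => [s, '-']) t').flatten).dropLast
          = List.intersperse '-' (b :: t') from ih (by simp)]
      simp [List.intersperse]

lemma row_slice (net b : Int) (hb : 0 < b) (r : Int) (hr0 : 0 ≤ r) (hrb : r < b) :
    PySem.List.slice (pvFlat net (b * b).toNat) (some (r * b)) (some ((r + 1) * b))
      = (PySem.List.pyRange 0 b 1).map (fun c => pv_get_print_symbol net (r * b + c)) := by
  have hN : b = ((b.toNat : Nat) : Int) := by omega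
  have hj : r = ((r.toNat : Nat) : Int) := by omega
  have e1 : r * b = ((r.toNat * b.toNat : Nat) : Int) := by push_cast; rw [← hN, ← hj]
  have e2 : (r + 1) * b = ((r.toNat * b.toNat : Nat) : Int) + ((b.toNat : Nat) : Int) := by
    push_cast; rw [← hN, ← hj]; ring
  have hNN : (b * b).toNat = b.toNat * b.toNat := by
    have h1 : ((b.toNat * b.toNat : Nat) : Int) = b * b := by push_cast; rw [← hN]
    omega
  have hexp : (r.toNat + 1) * b.toNat = r.toNat * b.toNat + b.toNat := by ring
  have hle : (r.toNat + 1) * b.toNat ≤ b.toNat * b.toNat :=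
    Nat.mul_le_mul_right _ (by omega)
  rw [e1, e2, PySem.List.slice_natCast_add]
  apply List.ext_getElem
  · rw [List.length_take, List.length_drop, length_flat, hNN]
    simp [PySem.List.length_pyRange_one]
    omega
  · intro k h1 h2
    have hk : k < b.toNat := by
      rw [List.length_take, List.length_drop, length_flat, hNN] at h1; omega
    rw [List.getElem_take, List.getElem_drop,
      flat_getElem net _ _ (by rw [hNN]; omega) (by rw [length_flat, hNN]; omega)]
    rw [List.getElem_map, PySem.List.getElem_pyRange_one]
    congr 1
    push_cast
    rw [← hN, ← hj]
    ring

lemma pp_eq_alt : ∀ (net b : Int), pp_network net b = pp_network_alt net b := by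
  intro net b
  unfold pp_network pp_network_alt
  by_cases hb : b ≤ 0
  · rw [if_pos hb, PySem.List.pyRange_one_eq_nil hb]
    rfl
  · push Not at hb
    rw [if_neg (by omega)]
    show String.ofList ((PySem.List.pyRange 0 b 1).foldl (fun ret line =>
        PySem.List.slice ((PySem.List.pyRange 0 b 1).foldl (fun ret column =>
          ret ++ [pv_get_print_symbol net (line * b + column), '-']) ret) none (some (-1)) ++ ['\n']) [])
      = String.ofList (((PySem.List.pyRange 0 b 1).map (fun r =>
          (PySem.List.slice (pvFlat net (b * b).toNat) (some (r * b)) (some ((r + 1) * b))).intersperse '-'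
            ++ ['\n'])).flatten)
    congr 1
    have hcons := PySem.List.pyRange_one_cons (a := 0) (b := b) hb
    have hstep : ∀ (acc : List Char), ∀ line ∈ PySem.List.pyRange 0 b 1,
        (fun ret line =>
          PySem.List.slice ((PySem.List.pyRange 0 b 1).foldl (fun ret column =>
            ret ++ [pv_get_print_symbol net (line * b + column), '-']) ret) none (some (-1)) ++ ['\n']) acc line
        = (fun ret line => ret ++ (((PySem.List.pyRange 0 b 1).map
            (fun c => pv_get_print_symbol net (line * b + c))).intersperse '-' ++ ['\n'])) acc line := by
      intro acc line _
      simp only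
      rw [PySem.List.foldl_append_eq_flatMap (fun column => [pv_get_print_symbol net (line * b + column), '-'])]
      rw [PySem.List.slice_to_neg_one]
      have hnil : List.flatMap (fun column => [pv_get_print_symbol net (line * b + column), '-'])
          (PySem.List.pyRange 0 b 1) ≠ [] := by
        rw [hcons]; simp
      rw [List.dropLast_append_of_ne_nil hnil]
      rw [List.flatMap_def,
        show (PySem.List.pyRange 0 b 1).map (fun column => [pv_get_print_symbol net (line * b + column), '-'])
          = ((PySem.List.pyRange 0 b 1).map (fun c => pv_get_print_symbol net (line * b + c))).map
              (fun s => [s, '-']) from by rw [List.map_map]; rfl]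
      rw [flatten_dash_dropLast _ (by rw [hcons]; simp), List.append_assoc]
    rw [PySem.List.foldl_congr_mem _ _ _ _ hstep,
      PySem.List.foldl_append_eq_flatMap, List.nil_append, List.flatMap_def]
    apply congrArg
    apply List.map_congr_left
    intro line hline
    have hm := PySem.List.mem_pyRange_one.mp hline
    rw [row_slice net b hb line hm.1 hm.2]

-- ===== VERDICT (by name: the statement is the Claim_ definition above) =====
theorem pp_network_spec : Claim_equal_pp_network := by
  intro network box_size _
  unfold Spec_pp_network
  exact pp_eq_alt network box_size
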